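-- pv_equiv track=rewrite | github.com/bebeh3176/Dofus_farming | BOT_Dofus/Divers/Fct_script.py | lire_zaap
-- ===== SOURCE A (Python) =====
-- def lire_zaap(script,listzaap):
--     begin = False
--     for i in script:
--         if i == 'fin Zaap':
--             break
--         if i == 'Zaap':
--             begin = True
--         elif (begin):
--             if(not(i in listzaap)):
--                 listzaap.append(i)
--     return listzaap
-- ===== SOURCE B (Python) =====
-- def lire_zaap(script, listzaap):
--     # locate the markers, then dedup the region once via a hash index (dict.fromkeys)
--     # and append the new items in one batch; mutates and returns the same listzaap.
--     try:
--         region = script[:script.index('fin Zaap')]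
--     except ValueError:
--         region = script
--     try:
--         start = region.index('Zaap')
--     except ValueError:
--         return listzaap
--     old = set(listzaap)
--     listzaap += [x for x in dict.fromkeys(region[start + 1:])
--                  if x != 'Zaap' and x not in old]
--     return listzaap
-- ===== Notes on version B (the rewrite author's own statement) =====
-- stated objective: alternative
-- what changed: Replaces the flag-driven pass that rescans the growing listzaap for every item with a staged pipeline: locate the two markers, dedup the region's tail once with a hash index (dict.fromkeys), filter against a set of the incoming list, and append the new items in one batch.
import Mathlib
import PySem

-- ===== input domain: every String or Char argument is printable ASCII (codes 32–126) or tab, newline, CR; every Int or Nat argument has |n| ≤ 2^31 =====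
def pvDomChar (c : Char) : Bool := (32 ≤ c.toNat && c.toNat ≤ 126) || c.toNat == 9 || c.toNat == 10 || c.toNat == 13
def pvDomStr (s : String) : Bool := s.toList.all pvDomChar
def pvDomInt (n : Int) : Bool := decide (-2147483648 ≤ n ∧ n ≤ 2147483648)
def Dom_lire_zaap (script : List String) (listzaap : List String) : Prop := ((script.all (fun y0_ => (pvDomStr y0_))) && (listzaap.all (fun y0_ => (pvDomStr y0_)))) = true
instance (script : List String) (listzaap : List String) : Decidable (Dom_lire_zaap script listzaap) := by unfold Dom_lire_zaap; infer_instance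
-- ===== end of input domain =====

-- B replaces A's flag-driven dedup-append pass by: locate the markers, dedup the region's tail once via dict.fromkeys, and append the new items in one batch filtered against a set of the incoming list; equivalence is about the return value (both Pythons mutate listzaap the same way).


-- ===== PORT A =====
-- A's loop: one pass with a `begin` flag, break on 'fin Zaap', dedup-append after 'Zaap'
def lzGoA : List String → Bool → List String → List String
  | [], _, acc => acc
  | i :: rest, b, acc =>
    if i = "fin Zaap" then acc
    else if i = "Zaap" then lzGoA rest true acc
    else if b then (if ¬ (i ∈ acc) then lzGoA rest b (acc ++ [i]) else lzGoA rest b acc)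
    else lzGoA rest b acc

def lire_zaap (script : List String) (listzaap : List String) : List String :=
  lzGoA script false listzaap

-- ===== PORT B =====
-- B: region = script[:index('fin Zaap')] (whole script if absent); if 'Zaap' absent return listzaap;
-- else dedup region[start+1:] with dict.fromkeys (= PySem.List.dedup) and append the batch
-- filtered by x != 'Zaap' and x not in set(listzaap) (= PySem.Set.ofList).
def lire_zaap_alt (script : List String) (listzaap : List String) : List String :=
  let region : List String :=
    match PySem.List.index? script "fin Zaap" with
    | some j => PySem.List.slice script none (some (j : Int))
    | none => script
  match PySem.List.index? region "Zaap" with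
  | none => listzaap
  | some start =>
    let old := PySem.Set.ofList listzaap
    listzaap ++
      (PySem.List.dedup (PySem.List.slice region (some ((start : Int) + 1)) none)).filter
        (fun x => !(x == "Zaap") && !(PySem.Set.contains old x))

-- ===== PRECONDITION & SPEC =====
def Spec_lire_zaap (script : List String) (listzaap : List String) (out : List String) : Prop := out = lire_zaap_alt script listzaap
instance (script : List String) (listzaap : List String) (out : List String) : Decidable (Spec_lire_zaap script listzaap out) := by unfold Spec_lire_zaap; infer_instance

-- ===== CLAIM (what is proved, stated in full; the proofs are below) =====
def Claim_equal_lire_zaap : Prop := ∀ (script : List String) (listzaap : List String), Dom_lire_zaap script listzaap → Spec_lire_zaap script listzaap (lire_zaap script listzaap)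

-- ===== LEMMAS AND PROOFS =====

-- the state transformer of one step of A's loop once the flag is set (proof-side helper)
def lzStep (acc : List String) (i : String) : List String :=
  if i ≠ "Zaap" ∧ i ∉ acc then acc ++ [i] else acc

-- B's region (slice up to the first 'fin Zaap', or the whole list) is a takeWhile prefix
theorem lz_region_eq (s : List String) :
    (match PySem.List.index? s "fin Zaap" with
     | some j => PySem.List.slice s none (some (j : Int))
     | none => s) = s.takeWhile (fun x => x != "fin Zaap") := by
  induction s with
  | nil => simp [PySem.List.index?]
  | cons x rest ih =>
    by_cases hx : x = "fin Zaap"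
    · subst hx
      rw [PySem.List.index?_cons_self]
      have := PySem.List.slice_to_natCast ("fin Zaap" :: rest) 0
      simp at this
      simp [this]
    · rw [PySem.List.index?_cons_of_ne rest hx]
      cases h : PySem.List.index? rest "fin Zaap" with
      | none =>
        rw [h] at ih
        simp [hx, ← ih]
      | some j =>
        rw [h] at ih
        have ih' : List.take j rest = rest.takeWhile (fun x => x != "fin Zaap") := by
          simpa [PySem.List.slice_to_natCast] using ih
        simp only [Option.map_some]
        rw [PySem.List.slice_to_natCast]
        simp [hx, List.take_succ_cons, ih']

-- after the flag is set, A's loop is a fold of lzStep over the remaining region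
theorem lz_goTrue (s : List String) (acc : List String) :
    lzGoA s true acc = (s.takeWhile (fun x => x != "fin Zaap")).foldl lzStep acc := by
  induction s generalizing acc with
  | nil => simp [lzGoA]
  | cons x rest ih =>
    by_cases hfin : x = "fin Zaap"
    · subst hfin; simp [lzGoA]
    · by_cases hz : x = "Zaap"
      · subst hz
        simp [lzGoA, ih, lzStep]
      · by_cases hm : x ∈ acc
        · simp [lzGoA, hfin, hz, hm, ih, lzStep]
        · simp [lzGoA, hfin, hz, hm, ih, lzStep]

-- before the flag is set: find 'Zaap' in the region, fold over what follows
theorem lz_goFalse (s : List String) (acc : List String) :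
    lzGoA s false acc =
      (match PySem.List.index? (s.takeWhile (fun x => x != "fin Zaap")) "Zaap" with
       | none => acc
       | some start => ((s.takeWhile (fun x => x != "fin Zaap")).drop (start + 1)).foldl lzStep acc) := by
  induction s generalizing acc with
  | nil => simp [lzGoA, PySem.List.index?]
  | cons x rest ih =>
    by_cases hfin : x = "fin Zaap"
    · subst hfin; simp [lzGoA, PySem.List.index?]
    · by_cases hz : x = "Zaap"
      · subst hz
        have h1 : (("Zaap" :: rest).takeWhile (fun x => x != "fin Zaap")) =
            "Zaap" :: rest.takeWhile (fun x => x != "fin Zaap") := by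
          simp
        rw [h1, PySem.List.index?_cons_self]
        simpa [lzGoA] using lz_goTrue rest acc
      · have h1 : ((x :: rest).takeWhile (fun x => x != "fin Zaap")) =
            x :: rest.takeWhile (fun x => x != "fin Zaap") := by
          simp [hfin]
        rw [h1, PySem.List.index?_cons_of_ne _ hz]
        cases h : PySem.List.index? (rest.takeWhile (fun x => x != "fin Zaap")) "Zaap" with
        | none =>
          have := ih acc
          rw [h] at this
          simp [lzGoA, hfin, hz, this]
        | some k =>
          have := ih acc
          rw [h] at this
          simp [lzGoA, hfin, hz, this, List.drop_succ_cons]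

-- A's dedup-append fold equals the batch append of the deduped, filtered list
theorem lz_fold (l : List String) (acc : List String) :
    l.foldl lzStep acc =
      acc ++ (PySem.List.dedup l).filter
        (fun x => !(x == "Zaap") && !(decide (x ∈ acc))) := by
  induction l generalizing acc with
  | nil => simp [PySem.List.dedup, PySem.Set.ofList]
  | cons x l ih =>
    have hded : PySem.List.dedup (x :: l)
        = x :: (PySem.List.dedup l).filter (fun y => !(y == x)) := by
      simp [PySem.List.dedup, PySem.Set.ofList_cons, PySem.Set.discard]
    rw [hded]
    by_cases hz : x = "Zaap"
    · subst hz
      have hstep : lzStep acc "Zaap" = acc := by simp [lzStep]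
      rw [List.foldl_cons, hstep, ih, List.filter_cons]
      simp only [beq_self_eq_true, Bool.not_true, Bool.false_and,
        if_neg (by simp : ¬ (false = true)), List.filter_filter]
      congr 1
      apply List.filter_congr
      intro y _
      by_cases h : y = "Zaap" <;> simp [h]
    · by_cases hm : x ∈ acc
      · have hstep : lzStep acc x = acc := by simp [lzStep, hm]
        rw [List.foldl_cons, hstep, ih, List.filter_cons]
        have hp : (!(x == "Zaap") && !(decide (x ∈ acc))) = false := by simp [hm]
        rw [hp]
        simp only [if_neg (by simp : ¬ (false = true)), List.filter_filter]
        congr 1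
        apply List.filter_congr
        intro y _
        by_cases h : y = x
        · subst h; simp [hm]
        · simp [h]
      · have hstep : lzStep acc x = acc ++ [x] := by simp [lzStep, hz, hm]
        rw [List.foldl_cons, hstep, ih, List.filter_cons]
        have hp : (!(x == "Zaap") && !(decide (x ∈ acc))) = true := by simp [hz, hm]
        rw [hp]
        simp only [List.filter_filter, List.append_assoc, List.singleton_append]
        congr 2
        apply List.filter_congr
        intro y _
        by_cases h1 : y = "Zaap"
        · simp [h1]
        · by_cases h2 : y = x
          · subst h2; simp [hm]
          · by_cases h3 : y ∈ acc <;> simp [h1, h2, h3]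

-- ===== VERDICT (by name: the statement is the Claim_ definition above) =====
theorem lire_zaap_spec : Claim_equal_lire_zaap := by
  intro script listzaap _
  unfold Spec_lire_zaap lire_zaap lire_zaap_alt
  rw [lz_goFalse]
  simp only [lz_region_eq]
  cases h : PySem.List.index? (script.takeWhile (fun x => x != "fin Zaap")) "Zaap" with
  | none => rfl
  | some start =>
    show List.foldl lzStep listzaap
        (List.drop (start + 1) (List.takeWhile (fun x => x != "fin Zaap") script)) =
      listzaap ++
        List.filter (fun x => !(x == "Zaap") && !(PySem.Set.contains (PySem.Set.ofList listzaap) x))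
          (PySem.List.dedup (PySem.List.slice (List.takeWhile (fun x => x != "fin Zaap") script) (some ((start : Int) + 1)) none))
    have hslice : PySem.List.slice (script.takeWhile (fun x => x != "fin Zaap"))
        (some ((start : Int) + 1)) none
        = (script.takeWhile (fun x => x != "fin Zaap")).drop (start + 1) := by
      rw [show ((start : Int) + 1) = (((start + 1 : Nat)) : Int) by push_cast; ring,
          PySem.List.slice_from_natCast]
    rw [hslice, lz_fold]
    congr 1
    apply List.filter_congr
    intro x _
    simp [PySem.Set.contains]
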